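-- pv_equiv track=rewrite | github.com/vitorsmends/mharvellous-start | minions.py | utilize
-- ===== SOURCE A (Python) =====
-- def utilize(s):
--     p1 = 0
--     p2 = 0
--     r = len(s)
--     for i in range(r):
--         if s[i] in "AEIOU":
--             p1 += r-i
--         else :
--             p2 += r-i
--     return p1, p2
-- ===== SOURCE B (Python) =====
-- def utilize(s):
--     # Prefix-count reformulation: sum_{i vowel}(r-i) == sum over prefixes of the
--     # running vowel count, so keep running counts and add them each step.
--     v = t = p1 = p2 = 0
--     for ch in s:
--         if ch in "AEIOU":
--             v += 1
--         t += 1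
--         p1 += v
--         p2 += t - v
--     return p1, p2
-- ===== Notes on version B (the rewrite author's own statement) =====
-- stated objective: alternative
-- what changed: B replaces A's position-weight scheme (each char contributes r-i to p1 or p2, needing len(s) and indexing) by a prefix-count reformulation: it keeps running vowel and character counts and adds them at every step, using the identity sum_{vowel i}(r-i) = sum over prefixes of the prefix vowel count; no len(), no indices, no per-char weight.
import Mathlib
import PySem

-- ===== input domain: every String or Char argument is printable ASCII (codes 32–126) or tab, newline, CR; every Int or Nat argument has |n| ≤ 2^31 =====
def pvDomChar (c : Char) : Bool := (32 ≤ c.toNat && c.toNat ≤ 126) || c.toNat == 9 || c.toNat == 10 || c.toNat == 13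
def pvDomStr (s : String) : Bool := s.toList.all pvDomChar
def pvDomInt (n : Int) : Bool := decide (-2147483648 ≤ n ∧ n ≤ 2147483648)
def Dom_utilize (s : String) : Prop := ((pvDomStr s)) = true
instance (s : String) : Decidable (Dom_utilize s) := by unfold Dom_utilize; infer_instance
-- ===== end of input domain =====

-- B replaces A's position-weight scheme (r-i added to p1 or p2, needing len and indexing) by a
-- prefix-count pass: running vowel and char counts are added at every step (alternative, same cost).

-- ===== PORT A =====
-- A: two accumulators p1, p2 over `for i in range(r)`, adding r-i on a vowel/consonant branch.
-- s[i] is ported as pyGetD with a default; i is always in range here, so it is exact.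
def utilize (s : String) : Int × Int :=
  let l := s.toList
  let r : Int := PySem.Str.len s
  (PySem.List.pyRange 0 r 1).foldl
    (fun (p : Int × Int) i =>
      if PySem.List.pyGetD l i ' ' ∈ "AEIOU".toList then
        (p.1 + (r - i), p.2)
      else
        (p.1, p.2 + (r - i)))
    (0, 0)

-- ===== PORT B =====
-- B: one pass over the characters keeping (v, t, p1, p2) = (vowels so far, chars so far, sums).
def utilize_alt (s : String) : Int × Int :=
  let st := s.toList.foldl
    (fun (q : Int × Int × Int × Int) ch =>
      let v := if ch ∈ "AEIOU".toList then q.1 + 1 else q.1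
      let t := q.2.1 + 1
      (v, t, q.2.2.1 + v, q.2.2.2 + (t - v)))
    (0, 0, 0, 0)
  (st.2.2.1, st.2.2.2)

-- ===== PRECONDITION & SPEC =====
def Spec_utilize (s : String) (out : Int × Int) : Prop := out = utilize_alt s
instance (s : String) (out : Int × Int) : Decidable (Spec_utilize s out) := by unfold Spec_utilize; infer_instance

-- ===== CLAIM (what is proved, stated in full; the proofs are below) =====
def Claim_equal_utilize : Prop := ∀ (s : String), Dom_utilize s → Spec_utilize s (utilize s)

-- ===== LEMMAS AND PROOFS =====

-- prefix-weight sum of the vowels of l: each vowel at depth k of l contributes (len l - k)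
def pvPs : List Char → Int
  | [] => 0
  | c :: t => (if c ∈ "AEIOU".toList then ((t.length : Int) + 1) else 0) + pvPs t

-- triangular number 1 + 2 + … + n
def pvTri : Nat → Int
  | 0 => 0
  | n + 1 => ((n : Int) + 1) + pvTri n

-- A's pair fold over enumerate, when r - s = len l, lands on (a + pvPs l, b + pvTri - pvPs l)
theorem pvA_fold (r : Int) (l : List Char) : ∀ (s a b : Int), r - s = (l.length : Int) →
    ((PySem.List.enumerate l s).foldl
      (fun (p : Int × Int) ic =>
        if ic.2 ∈ "AEIOU".toList then (p.1 + (r - ic.1), p.2) else (p.1, p.2 + (r - ic.1)))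
      (a, b))
    = (a + pvPs l, b + pvTri l.length - pvPs l) := by
  induction l with
  | nil => intro s a b h; simp [PySem.List.enumerate_nil, pvPs, pvTri]
  | cons c t ih =>
    intro s a b h
    rw [PySem.List.enumerate_cons]
    simp only [List.foldl_cons, List.length_cons]
    by_cases hc : c ∈ "AEIOU".toList
    · simp only [hc, if_pos]
      rw [ih (s + 1) (a + (r - s)) b (by simp only [List.length_cons] at h; push_cast at h ⊢; omega)]
      simp only [pvPs, pvTri, hc, if_pos]
      refine Prod.ext ?_ ?_ <;> · simp; try (simp only [List.length_cons] at h; push_cast at h ⊢; omega)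
    · simp only [hc, if_neg, not_false_iff]
      rw [ih (s + 1) a (b + (r - s)) (by simp only [List.length_cons] at h; push_cast at h ⊢; omega)]
      simp only [pvPs, pvTri, hc, if_neg, not_false_iff]
      refine Prod.ext ?_ ?_ <;> · simp; try (simp only [List.length_cons] at h; push_cast at h ⊢; omega)

-- B's quadruple fold in closed form from any start state
theorem pvB_fold (l : List Char) : ∀ (v t p1 p2 : Int),
    (l.foldl
      (fun (q : Int × Int × Int × Int) ch =>
        let v := if ch ∈ "AEIOU".toList then q.1 + 1 else q.1
        let t := q.2.1 + 1
        (v, t, q.2.2.1 + v, q.2.2.2 + (t - v)))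
      (v, t, p1, p2))
    = (v + ((l.filter (· ∈ "AEIOU".toList)).length : Int),
       t + (l.length : Int),
       p1 + (l.length : Int) * v + pvPs l,
       p2 + (l.length : Int) * t + pvTri l.length - (l.length : Int) * v - pvPs l) := by
  induction l with
  | nil => intro v t p1 p2; simp [pvPs, pvTri]
  | cons c tl ih =>
    intro v t p1 p2
    simp only [List.foldl_cons]
    by_cases hc : c ∈ "AEIOU".toList
    · rw [List.filter_cons_of_pos (by simpa using hc)]
      simp only [hc, if_pos]
      rw [ih (v + 1) (t + 1) (p1 + (v + 1)) (p2 + (t + 1 - (v + 1)))]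
      simp only [pvPs, pvTri, hc, if_pos, List.length_cons]
      refine Prod.ext ?_ (Prod.ext ?_ (Prod.ext ?_ ?_)) <;> (push_cast; ring)
    · rw [List.filter_cons_of_neg (by simpa using hc)]
      simp only [hc, if_neg, not_false_iff]
      rw [ih v (t + 1) (p1 + v) (p2 + (t + 1 - v))]
      simp only [pvPs, pvTri, hc, if_neg, not_false_iff, List.length_cons]
      refine Prod.ext ?_ (Prod.ext ?_ (Prod.ext ?_ ?_)) <;> (push_cast; ring)

-- ===== VERDICT (by name: the statement is the Claim_ definition above) =====
theorem utilize_spec : Claim_equal_utilize := by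
  intro s _
  unfold Spec_utilize utilize utilize_alt
  simp only [PySem.Str.len_eq]
  set l := s.toList with hl
  -- rewrite A's range fold as a fold over enumerate
  rw [show PySem.List.pyRange 0 (l.length : Int) 1
        = (PySem.List.enumerate l 0).map (fun ic => ic.1) from by
      rw [PySem.List.map_fst_enumerate]; norm_num]
  rw [List.foldl_map]
  have hget : ∀ (acc : Int × Int), ∀ p ∈ PySem.List.enumerate l 0,
      (fun (q : Int × Int) (ic : Int × Char) =>
        if PySem.List.pyGetD l ic.1 ' ' ∈ "AEIOU".toList then (q.1 + ((l.length : Int) - ic.1), q.2)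
        else (q.1, q.2 + ((l.length : Int) - ic.1))) acc p
      = (fun (q : Int × Int) (ic : Int × Char) =>
        if ic.2 ∈ "AEIOU".toList then (q.1 + ((l.length : Int) - ic.1), q.2)
        else (q.1, q.2 + ((l.length : Int) - ic.1))) acc p := by
    intro acc p hp
    rcases ((PySem.List.mem_enumerate_iff l 0 p).mp hp) with ⟨k, hk, rfl⟩
    simp only []
    rw [PySem.List.pyGetD_eq_getElem l ' ' (by omega) (by omega)]
    simp only [zero_add, Int.toNat_natCast]
  rw [PySem.List.foldl_congr_mem _ _ _ _ hget]
  rw [pvA_fold (l.length : Int) l 0 0 0 (by omega)]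
  rw [pvB_fold l 0 0 0 0]
  simp
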